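-- pv_equiv track=rewrite | github.com/alimuteshov/Some_funcs | utils.py | count_groups_num
-- ===== SOURCE A (Python) =====
-- from typing import Dict
--
-- def sum_count(num: int) -> int:
--     cnt = 0
--     for digit in str(num):
--         cnt += int(digit)
--     return cnt
--
-- def count_groups_num(n_customers: int) -> Dict[int, int]:
--     groups_dct = {}
--
--     for i in range(n_customers):
--         counted = sum_count(i)
--         if counted in groups_dct:
--             groups_dct[counted] += 1
--         else:
--             groups_dct[counted] = 1
--
--     return groups_dct
-- ===== SOURCE B (Python) =====
-- def _digit_sum(q):
--     s = 0
--     while q: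
--         s += q % 10
--         q //= 10
--     return s
--
--
-- def _digit_sum_counts(n):
--     # counts[s] = how many x in [0, n) have digit sum s; recursion on n // 10
--     if n <= 0:
--         return []
--     q, m = divmod(n, 10)
--     prev = _digit_sum_counts(q)
--     if not prev:
--         # q == 0, so n = m < 10 and the digit sums of 0..n-1 are 0..n-1
--         return [1] * m
--     L = len(prev)
--     # x in [0, 10*q) is 10*a + b with a in [0, q), b in [0, 10): convolve with ones
--     res = [sum(prev[t - b] if b <= t < b + L else 0 for b in range(10))
--            for t in range(L + 9)]
--     # the partial block: x = 10*q + b for b in [0, m) has digit sum ds(q) + b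
--     dq = _digit_sum(q)
--     return [c + (1 if dq <= t < dq + m else 0) for t, c in enumerate(res)]
--
--
-- def count_groups_num(n_customers: int):
--     counts = _digit_sum_counts(max(n_customers, 0))
--     return {s: c for s, c in enumerate(counts)}
-- ===== Notes on version B (the rewrite author's own statement) =====
-- stated objective: faster
-- what changed: A counts each of the n numbers separately by summing the digits of its str(); B computes the whole digit-sum histogram at once with a digit-DP recursion on the quotient by ten (one convolution with a block of ten digit values per decimal level) and emits the pairs in ascending digit-sum order, which provably equals A's dict insertion order.
import Mathlib
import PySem

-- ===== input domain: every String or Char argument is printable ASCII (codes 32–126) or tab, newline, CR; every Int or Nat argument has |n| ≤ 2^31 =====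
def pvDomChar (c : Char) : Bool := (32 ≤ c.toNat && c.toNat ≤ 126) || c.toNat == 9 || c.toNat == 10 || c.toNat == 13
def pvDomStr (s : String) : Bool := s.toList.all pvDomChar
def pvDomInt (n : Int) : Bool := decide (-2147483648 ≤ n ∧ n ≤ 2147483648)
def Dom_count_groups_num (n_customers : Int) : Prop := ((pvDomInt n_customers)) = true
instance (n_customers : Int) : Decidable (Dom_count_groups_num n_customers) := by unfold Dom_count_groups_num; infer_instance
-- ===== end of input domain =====

-- B replaces A's per-number O(n·d) counting loop by a digit-DP recursion on n//10 (O(d²)); measured faster at large n.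

-- ===== PORT A =====

-- cnt = 0; for digit in str(num): cnt += int(digit)
-- int(digit) is ported as (ofChars? [ch]).getD 0; every char of str(num) parses, so the fallback is never taken
def sumCountA (num : Int) : Int :=
  (PySem.Int.toChars num).foldl (fun cnt ch => cnt + (PySem.Int.ofChars? [ch]).getD 0) 0

def count_groups_num (n_customers : Int) : List (Int × Int) :=
  ((PySem.List.pyRange 0 n_customers 1).foldl
    (fun groups_dct i =>
      let counted := sumCountA i
      if groups_dct.contains counted then
        groups_dct.insert counted (groups_dct.getD counted 0 + 1)
      else
        groups_dct.insert counted 1)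
    (PySem.Dict.empty : PySem.Dict Int Int)).items

-- ===== PORT B =====

-- s = 0; while q: s += q % 10; q //= 10   (q is always a nonnegative int, so it is ported on Nat)
def digitSumB (q s : Nat) : Nat :=
  if h : q = 0 then s else digitSumB (q / 10) (s + q % 10)
decreasing_by exact Nat.div_lt_self (Nat.pos_of_ne_zero h) (by norm_num)

-- _digit_sum_counts(n): counts[t] = how many x in [0, n) have digit sum t, recursion on n // 10
-- (n is always a nonnegative int, so it is ported on Nat; `n <= 0` is `n = 0`)
def cntsB (n : Nat) : List Int :=
  if h : n = 0 then []
  else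
    let q := n / 10
    let m := n % 10
    let prev := cntsB q
    if prev = [] then List.replicate m 1
    else
      let L := prev.length
      let res := (List.range (L + 9)).map (fun t =>
        ((List.range 10).map (fun b =>
          if b ≤ t ∧ t < b + L then prev.getD (t - b) 0 else (0 : Int))).sum)
      let dq := digitSumB q 0
      -- [c + (1 if dq <= t < dq + m else 0) for t, c in enumerate(res)]
      res.zipIdx.map (fun p => p.1 + if dq ≤ p.2 ∧ p.2 < dq + m then 1 else 0)
decreasing_by exact Nat.div_lt_self (Nat.pos_of_ne_zero h) (by norm_num)

def count_groups_num_alt (n_customers : Int) : List (Int × Int) :=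
  let counts := cntsB (max n_customers 0).toNat
  -- {s: c for s, c in enumerate(counts)}
  (PySem.Dict.ofList (PySem.List.enumerate counts 0)).items

-- ===== PRECONDITION & SPEC =====
def Spec_count_groups_num (n_customers : Int) (out : List (Int × Int)) : Prop := out = count_groups_num_alt n_customers
instance (n_customers : Int) (out : List (Int × Int)) : Decidable (Spec_count_groups_num n_customers out) := by unfold Spec_count_groups_num; infer_instance

-- ===== CLAIM (what is proved, stated in full; the proofs are below) =====
def Claim_equal_count_groups_num : Prop := ∀ (n_customers : Int), Dom_count_groups_num n_customers → Spec_count_groups_num n_customers (count_groups_num n_customers)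

-- ===== LEMMAS AND PROOFS =====

-- specification digit sum of a natural number
def dsN (n : Nat) : Nat :=
  if h : n = 0 then 0 else dsN (n / 10) + n % 10
decreasing_by exact Nat.div_lt_self (Nat.pos_of_ne_zero h) (by norm_num)

-- how many x in [0, N) have digit sum t
def cntN (N t : Nat) : Nat := (List.range N).countP (fun x => dsN x = t)

-- running: 1 + the largest digit sum seen among 0..k-1 (0 for k = 0)
def Mx : Nat → Nat
  | 0 => 0
  | k+1 => max (Mx k) (dsN k + 1)

-- the length recursion of cntsB
def LenB (n : Nat) : Nat :=
  if h : n = 0 then 0 else if n < 10 then n else LenB (n / 10) + 9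
decreasing_by exact Nat.div_lt_self (Nat.pos_of_ne_zero h) (by norm_num)

theorem digitSumB_eq (q s : Nat) : digitSumB q s = s + dsN q := by
  induction q using Nat.strong_induction_on generalizing s with
  | _ q ih =>
    rw [digitSumB, dsN]
    by_cases h : q = 0
    · simp [h]
    · rw [dif_neg h, dif_neg h, ih (q / 10) (Nat.div_lt_self (Nat.pos_of_ne_zero h) (by norm_num))]
      omega

theorem dsN_small {n : Nat} (h : n < 10) : dsN n = n := by
  rw [dsN]
  by_cases h0 : n = 0
  · simp [h0]
  · rw [dif_neg h0, Nat.div_eq_of_lt h]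
    have h1 : dsN 0 = 0 := by rw [dsN]; simp
    rw [h1]
    omega

theorem dsN_split (a b : Nat) (hb : b < 10) : dsN (10 * a + b) = dsN a + b := by
  by_cases h0 : 10 * a + b = 0
  · have ha : a = 0 := by omega
    have hb0 : b = 0 := by omega
    simp [ha, hb0]
  · rw [dsN, dif_neg h0]
    have h1 : (10 * a + b) / 10 = a := by omega
    have h2 : (10 * a + b) % 10 = b := by omega
    rw [h1, h2]

theorem dsN_succ_le (k : Nat) : dsN (k + 1) ≤ dsN k + 1 := by
  induction k using Nat.strong_induction_on with
  | _ k ih =>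
    by_cases hb : (k + 1) % 10 = 0
    · have ha : 1 ≤ (k + 1) / 10 := by omega
      have e1 : k + 1 = 10 * ((k + 1) / 10) + 0 := by omega
      have e2 : k = 10 * ((k + 1) / 10 - 1) + 9 := by omega
      have h1 : dsN (k + 1) = dsN ((k + 1) / 10) := by
        conv_lhs => rw [e1]
        rw [dsN_split _ _ (by norm_num)]
        omega
      have h2 : dsN k = dsN ((k + 1) / 10 - 1) + 9 := by
        conv_lhs => rw [e2]
        rw [dsN_split _ _ (by norm_num)]
      have h3 : (k + 1) / 10 - 1 < k := by omega
      have h4 := ih _ h3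
      have h5 : (k + 1) / 10 - 1 + 1 = (k + 1) / 10 := by omega
      rw [h5] at h4
      omega
    · have e1 : k + 1 = 10 * ((k + 1) / 10) + (k + 1) % 10 := by omega
      have e2 : k = 10 * ((k + 1) / 10) + ((k + 1) % 10 - 1) := by omega
      have h1 : dsN (k + 1) = dsN ((k + 1) / 10) + (k + 1) % 10 := by
        conv_lhs => rw [e1]
        exact dsN_split _ _ (by omega)
      have h2 : dsN k = dsN ((k + 1) / 10) + ((k + 1) % 10 - 1) := by
        conv_lhs => rw [e2]
        exact dsN_split _ _ (by omega)
      omega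

theorem Mx_mono {j k : Nat} (h : j ≤ k) : Mx j ≤ Mx k := by
  induction k with
  | zero => have : j = 0 := by omega
            simp [this]
  | succ k ih =>
    by_cases hj : j ≤ k
    · exact le_trans (ih hj) (le_max_left _ _)
    · have : j = k + 1 := by omega
      simp [this]

theorem dsN_le_Mx (k : Nat) : dsN k ≤ Mx k := by
  induction k with
  | zero => rw [dsN]; simp [Mx]
  | succ k ih =>
    have := dsN_succ_le k
    have h2 : dsN k + 1 ≤ Mx (k + 1) := le_max_right _ _
    omega

theorem dsN_lt_Mx {x N : Nat} (h : x < N) : dsN x < Mx N := by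
  have h1 : dsN x + 1 ≤ Mx (x + 1) := le_max_right _ _
  have h2 : Mx (x + 1) ≤ Mx N := Mx_mono h
  omega

theorem cnt_eq_zero {N t : Nat} (h : Mx N ≤ t) : cntN N t = 0 := by
  apply List.countP_eq_zero.2
  intro x hx
  have : dsN x < Mx N := dsN_lt_Mx (List.mem_range.1 hx)
  simp only [decide_eq_true_eq]
  omega

theorem Mx_small {n : Nat} (h : n ≤ 10) : Mx n = n := by
  induction n with
  | zero => rfl
  | succ n ih =>
    have h1 : Mx (n + 1) = max (Mx n) (dsN n + 1) := rfl
    rw [h1, ih (by omega), dsN_small (by omega)]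
    omega

theorem Mx_part (q j : Nat) (h1 : 1 ≤ j) (h2 : j ≤ 10) :
    Mx (10 * q + j) = max (Mx (10 * q)) (dsN q + j) := by
  induction j with
  | zero => omega
  | succ j ih =>
    have hstep : Mx (10 * q + j + 1) = max (Mx (10 * q + j)) (dsN (10 * q + j) + 1) := rfl
    by_cases hj : j = 0
    · subst hj
      have hds0 : dsN (10 * q) = dsN q := by simpa using dsN_split q 0 (by norm_num)
      rw [show 10 * q + 1 = 10 * q + 0 + 1 from rfl, hstep,
        show 10 * q + 0 = 10 * q from rfl, hds0]
    · have hds : dsN (10 * q + j) = dsN q + j := dsN_split q j (by omega)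
      rw [show 10 * q + (j + 1) = 10 * q + j + 1 from rfl, hstep, ih (by omega) (by omega), hds]
      omega

theorem Mx_ten (q : Nat) (h : 1 ≤ q) : Mx (10 * q) = Mx q + 9 := by
  induction q with
  | zero => omega
  | succ q ih =>
    by_cases hq : q = 0
    · subst hq
      rw [show 10 * 1 = 10 from rfl, Mx_small (le_refl 10), Mx_small (by norm_num)]
    · have h10 : Mx (10 * (q + 1)) = max (Mx (10 * q)) (dsN q + 10) := by
        rw [show 10 * (q + 1) = 10 * q + 10 by ring]
        exact Mx_part q 10 (by norm_num) (le_refl 10)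
      have hsucc : Mx (q + 1) = max (Mx q) (dsN q + 1) := rfl
      rw [h10, ih (by omega), hsucc]
      omega

theorem Mx_mix (q m : Nat) (hq : 1 ≤ q) (hm : m ≤ 9) : Mx (10 * q + m) = Mx q + 9 := by
  by_cases hm0 : m = 0
  · subst hm0
    rw [show 10 * q + 0 = 10 * q from rfl]
    exact Mx_ten q hq
  · rw [Mx_part q m (by omega) (by omega), Mx_ten q hq]
    have := dsN_le_Mx q
    omega

theorem LenB_eq_Mx (n : Nat) : LenB n = Mx n := by
  induction n using Nat.strong_induction_on with
  | _ n ih =>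
    rw [LenB]
    by_cases h0 : n = 0
    · simp [h0, Mx]
    · rw [dif_neg h0]
      by_cases h10 : n < 10
      · rw [if_pos h10, Mx_small (by omega)]
      · rw [if_neg h10, ih (n / 10) (Nat.div_lt_self (Nat.pos_of_ne_zero h0) (by norm_num))]
        have e : 10 * (n / 10) + n % 10 = n := by omega
        have := Mx_mix (n / 10) (n % 10) (by omega) (by omega)
        rw [e] at this
        omega

theorem cnt_succ (N t : Nat) : cntN (N + 1) t = cntN N t + (if dsN N = t then 1 else 0) := by
  simp only [cntN, List.range_succ, List.countP_append, List.countP_cons, List.countP_nil]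
  by_cases h : dsN N = t <;> simp [h]

theorem cnt_block (q t m : Nat) (hm : m ≤ 10) :
    cntN (10 * q + m) t = cntN (10 * q) t + (if dsN q ≤ t ∧ t < dsN q + m then 1 else 0) := by
  induction m with
  | zero => simp
  | succ m ih =>
    rw [show 10 * q + (m + 1) = (10 * q + m) + 1 from rfl, cnt_succ, ih (by omega),
      dsN_split q m (by omega)]
    split_ifs <;> omega

theorem countP_range_eq (n K : Nat) :
    (List.range n).countP (fun b => b = K) = if K < n then 1 else 0 := by
  induction n with
  | zero => simp
  | succ n ih =>
    rw [List.range_succ, List.countP_append, ih]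
    by_cases h : n = K <;> by_cases h2 : K < n <;>
      simp [h, h2] <;> omega

theorem sum_indicator (n K : Nat) :
    ((List.range n).map (fun b => if b = K then (1 : Nat) else 0)).sum = if K < n then 1 else 0 := by
  induction n with
  | zero => simp
  | succ n ih =>
    rw [List.range_succ, List.map_append, List.sum_append, ih]
    by_cases h : n = K <;> by_cases h2 : K < n <;> simp [h, h2] <;> omega

theorem sum_ind (q t : Nat) :
    ((List.range 10).map (fun b => if b ≤ t ∧ dsN q = t - b then (1 : Nat) else 0)).sum
      = if dsN q ≤ t ∧ t < dsN q + 10 then 1 else 0 := by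
  by_cases hP : dsN q ≤ t
  · have hc : ∀ b : Nat, ((b ≤ t ∧ dsN q = t - b) = (b = t - dsN q)) := by
      intro b
      apply propext
      omega
    simp only [hc]
    rw [sum_indicator]
    split_ifs <;> omega
  · have hc : ∀ b : Nat, ((b ≤ t ∧ dsN q = t - b) = False) := by
      intro b
      refine propext ⟨fun h => ?_, False.elim⟩
      omega
    simp only [hc]
    simp [hP]

theorem sum_map_add_nat (l : List Nat) (f g : Nat → Nat) :
    (l.map (fun b => f b + g b)).sum = (l.map f).sum + (l.map g).sum := by
  induction l with
  | nil => rfl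
  | cons x l ih => simp [ih]; omega

theorem cnt_ten (q t : Nat) :
    cntN (10 * q) t = ((List.range 10).map (fun b => if b ≤ t then cntN q (t - b) else 0)).sum := by
  induction q with
  | zero =>
    have h0 : ∀ s, cntN 0 s = 0 := by intro s; simp [cntN]
    simp [h0]
  | succ q ih =>
    have hL : cntN (10 * (q + 1)) t
        = cntN (10 * q) t + (if dsN q ≤ t ∧ t < dsN q + 10 then 1 else 0) := by
      rw [show 10 * (q + 1) = 10 * q + 10 by ring]
      exact cnt_block q t 10 (le_refl 10)
    have hterm : ∀ b : Nat,
        (if b ≤ t then cntN (q + 1) (t - b) else 0)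
          = (if b ≤ t then cntN q (t - b) else 0) + (if b ≤ t ∧ dsN q = t - b then 1 else 0) := by
      intro b
      by_cases hb : b ≤ t
      · rw [if_pos hb, if_pos hb, cnt_succ]
        by_cases he : dsN q = t - b
        · simp [he, hb]
        · simp [he, hb]
      · simp [hb]
    simp only [hterm]
    rw [sum_map_add_nat, ← ih, sum_ind, hL]

theorem cnt_window (q t : Nat) :
    cntN (10 * q) t
      = ((List.range 10).map (fun b => if b ≤ t ∧ t < b + LenB q then cntN q (t - b) else 0)).sum := by
  rw [cnt_ten]
  congr 1
  apply List.map_congr_left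
  intro b _
  by_cases hb : b ≤ t
  · by_cases hw : t < b + LenB q
    · simp [hb, hw]
    · rw [if_pos hb, if_neg (by tauto)]
      apply cnt_eq_zero
      rw [← LenB_eq_Mx]
      omega
  · simp [hb]

theorem valChar (d : Nat) (h : d < 10) :
    (PySem.Int.ofChars? [Nat.digitChar d]).getD 0 = (d : Int) := by
  interval_cases d <;> decide

theorem foldl_val (l : List Char) (c : Int) :
    l.foldl (fun c ch => c + (PySem.Int.ofChars? [ch]).getD 0) c
      = c + (l.map (fun ch => (PySem.Int.ofChars? [ch]).getD 0)).sum := by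
  induction l generalizing c with
  | nil => simp
  | cons x l ih => simp [ih, add_assoc]

theorem sum_toDigitsCore (f : Nat) : ∀ (n : Nat) (acc : List Char), n < 10 ^ f →
    (Nat.toDigitsCore 10 f n acc).foldl (fun c ch => c + (PySem.Int.ofChars? [ch]).getD 0) 0
      = (dsN n : Int) + acc.foldl (fun c ch => c + (PySem.Int.ofChars? [ch]).getD 0) 0 := by
  induction f with
  | zero =>
    intro n acc h
    have hn : n = 0 := by omega
    have h0 : dsN 0 = 0 := by rw [dsN]; simp
    subst hn
    rw [Nat.toDigitsCore]
    simp [h0]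
  | succ f ih =>
    intro n acc h
    rw [Nat.toDigitsCore]
    by_cases h0 : n / 10 = 0
    · simp only [h0, if_pos]
      rw [foldl_val, foldl_val]
      simp only [List.map_cons, List.sum_cons]
      rw [valChar (n % 10) (by omega), dsN_small (by omega)]
      omega
    · rw [if_neg h0]
      have hb : n / 10 < 10 ^ f := by
        rw [pow_succ] at h
        omega
      rw [ih (n / 10) _ hb, foldl_val, foldl_val]
      simp only [List.map_cons, List.sum_cons]
      rw [valChar (n % 10) (by omega)]
      have hds : dsN n = dsN (n / 10) + n % 10 := by
        rw [dsN, dif_neg (by omega : ¬ n = 0)]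
      rw [hds]
      push_cast
      ring

theorem sumCountA_cast (k : Nat) : sumCountA (k : Int) = (dsN k : Int) := by
  unfold sumCountA
  rw [PySem.Int.toChars, if_neg (by omega : ¬ ((k : Int) < 0)), Int.toNat_natCast]
  rw [Nat.toDigits]
  have hk : k < 10 ^ (k + 1) := by
    calc k < 10 ^ k := Nat.lt_pow_self (by norm_num)
    _ ≤ 10 ^ (k + 1) := Nat.pow_le_pow_right (by norm_num) (by omega)
  rw [sum_toDigitsCore (k + 1) k [] hk]
  simp

theorem set_char (N : Nat) :
    PySem.Set.ofList ((List.range N).map (fun k => (dsN k : Int)))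
      = (List.range (Mx N)).map (fun s : Nat => (s : Int)) := by
  induction N with
  | zero => rfl
  | succ N ih =>
    rw [List.range_succ, List.map_append, List.map_singleton]
    rw [show PySem.Set.ofList (((List.range N).map (fun k => (dsN k : Int))) ++ [(dsN N : Int)])
        = PySem.Set.add (PySem.Set.ofList ((List.range N).map (fun k => (dsN k : Int)))) (dsN N : Int)
      from List.foldl_append .., ih, PySem.Set.add]
    have hle := dsN_le_Mx N
    have hMx : Mx (N + 1) = max (Mx N) (dsN N + 1) := rfl
    by_cases hlt : dsN N < Mx N
    · rw [if_pos ?hc, hMx, Nat.max_eq_left (by omega)]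
      case hc =>
        rw [PySem.Set.contains, List.contains_iff_mem]
        exact List.mem_map.2 ⟨dsN N, List.mem_range.2 hlt, rfl⟩
    · have heq : dsN N = Mx N := by omega
      rw [if_neg ?hc2, hMx, Nat.max_eq_right (by omega), List.range_succ, List.map_append,
        List.map_singleton, heq]
      case hc2 =>
        rw [PySem.Set.contains, List.contains_iff_mem]
        intro hmem
        obtain ⟨x, hx, hxe⟩ := List.mem_map.1 hmem
        have h1 := List.mem_range.1 hx
        have h2 : x = dsN N := by exact_mod_cast hxe
        omega

theorem count_sums (N s : Nat) :
    List.count ((s : Int)) ((List.range N).map (fun k => (dsN k : Int))) = cntN N s := by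
  rw [List.count, List.countP_map, cntN]
  apply List.countP_congr
  intro k _
  simp only [Function.comp_apply, beq_iff_eq, Nat.cast_inj, decide_eq_true_eq]

theorem getD_not_contains (d : PySem.Dict Int Int) (x : Int) (h : d.contains x = false) :
    d.getD x 0 = 0 := by
  rw [PySem.Dict.getD, PySem.Dict.get?]
  have hfind : d.items.find? (fun p => p.1 == x) = none := by
    rw [List.find?_eq_none]
    intro p hp
    rw [PySem.Dict.contains] at h
    have := List.any_eq_false.1 h p hp
    simpa using this
  rw [hfind]
  rfl

theorem A_items (n : Int) :
    count_groups_num n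
      = (List.range (Mx n.toNat)).map (fun s : Nat => ((s : Int), (cntN n.toNat s : Int))) := by
  unfold count_groups_num
  have hbody : (List.foldl (fun (groups_dct : PySem.Dict Int Int) (i : Int) =>
      let counted := sumCountA i
      if groups_dct.contains counted then groups_dct.insert counted (groups_dct.getD counted 0 + 1)
      else groups_dct.insert counted 1) PySem.Dict.empty (PySem.List.pyRange 0 n 1))
      = List.foldl (fun (d : PySem.Dict Int Int) x => d.insert x (d.getD x 0 + 1))
          PySem.Dict.empty ((PySem.List.pyRange 0 n 1).map sumCountA) := by
    rw [List.foldl_map]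
    congr 1
    funext d i
    simp only []
    by_cases h : d.contains (sumCountA i)
    · rw [if_pos h]
    · rw [if_neg (by simpa using h), getD_not_contains d _ (by simpa using h)]
      norm_num
  rw [hbody]
  have hsums : (PySem.List.pyRange 0 n 1).map sumCountA
      = (List.range n.toNat).map (fun k => (dsN k : Int)) := by
    rw [PySem.List.pyRange_one, List.map_map]
    have he : ((n : Int) - 0).toNat = n.toNat := by omega
    rw [he]
    apply List.map_congr_left
    intro k _
    show sumCountA (0 + (k : Int)) = (dsN k : Int)
    rw [zero_add, sumCountA_cast]
  rw [hsums, PySem.Dict.foldl_insert_getD_add_one_eq_counter, PySem.Dict.items_counter,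
    set_char, List.map_map]
  apply List.map_congr_left
  intro s _
  show ((s : Int), (List.count ((s : Int)) ((List.range n.toNat).map (fun k => (dsN k : Int))) : Int)) = _
  rw [count_sums]

theorem zipIdx_map_range {α : Type} (f : Nat → α) (K : Nat) :
    ((List.range K).map f).zipIdx = (List.range K).map (fun t => (f t, t)) := by
  apply List.ext_getElem
  · simp
  · intro i h1 h2
    simp [List.getElem_zipIdx]

theorem LenB_pos (q : Nat) (h : 1 ≤ q) : 1 ≤ LenB q := by
  rw [LenB_eq_Mx]
  have h1 : Mx 1 ≤ Mx q := Mx_mono h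
  have h2 : Mx 1 = 1 := Mx_small (by norm_num)
  omega

theorem cntN_lt10 (n s : Nat) (hn : n < 10) (hs : s < n) : cntN n s = 1 := by
  rw [cntN]
  rw [List.countP_congr (q := fun x => x = s) ?_]
  · rw [countP_range_eq, if_pos hs]
  · intro x hx
    have hxn : x < n := List.mem_range.1 hx
    simp only [decide_eq_true_eq]
    rw [dsN_small (by omega)]

theorem cntsB_eq (n : Nat) : cntsB n = (List.range (LenB n)).map (fun s => (cntN n s : Int)) := by
  induction n using Nat.strong_induction_on with
  | _ n ih =>
    rw [cntsB]
    by_cases h0 : n = 0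
    · subst h0
      have hL : LenB 0 = 0 := by rw [LenB]; simp
      simp [hL]
    · rw [dif_neg h0]
      dsimp only []
      have hqlt : n / 10 < n := Nat.div_lt_self (Nat.pos_of_ne_zero h0) (by norm_num)
      rw [ih (n / 10) hqlt]
      by_cases hq0 : n / 10 = 0
      · have hn10 : n < 10 := by omega
        have hL0 : LenB (n / 10) = 0 := by rw [hq0, LenB]; simp
        rw [hL0]
        simp only [List.range_zero, List.map_nil, if_true]
        have hLn : LenB n = n := by rw [LenB, dif_neg h0, if_pos hn10]
        rw [hLn]
        symm
        rw [List.eq_replicate_iff]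
        constructor
        · simp
          omega
        · intro b hb
          obtain ⟨s, hs, rfl⟩ := List.mem_map.1 hb
          have hsn : s < n := List.mem_range.1 hs
          rw [cntN_lt10 n s hn10 hsn]
          rfl
      · have hq1 : 1 ≤ n / 10 := Nat.pos_of_ne_zero hq0
        have hLpos := LenB_pos (n / 10) hq1
        rw [if_neg (by
          simp only [List.map_eq_nil_iff, List.range_eq_nil]
          omega)]
        simp only [List.length_map, List.length_range]
        rw [digitSumB_eq, zipIdx_map_range, List.map_map]
        have hn10 : ¬ n < 10 := by omega
        have hLn : LenB n = LenB (n / 10) + 9 := by rw [LenB, dif_neg h0, if_neg hn10]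
        rw [hLn]
        apply List.map_congr_left
        intro t ht
        simp only [Function.comp_apply]
        have hn : n = 10 * (n / 10) + n % 10 := by omega
        have hb : cntN (10 * (n / 10) + n % 10) t
            = cntN (10 * (n / 10)) t
              + (if dsN (n / 10) ≤ t ∧ t < dsN (n / 10) + n % 10 then 1 else 0) :=
          cnt_block _ t _ (by omega)
        have hcast : ((cntN (10 * (n / 10)) t : Nat) : Int)
            = ((List.range 10).map (fun b =>
                if b ≤ t ∧ t < b + LenB (n / 10) then (cntN (n / 10) (t - b) : Int) else 0)).sum := by
          rw [cnt_window, Nat.cast_list_sum, List.map_map]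
          congr 1
          apply List.map_congr_left
          intro b _
          simp only [Function.comp_apply]
          split_ifs <;> simp
        have hgetD : (fun b => if b ≤ t ∧ t < b + LenB (n / 10)
              then ((List.range (LenB (n / 10))).map (fun s => (cntN (n / 10) s : Int))).getD (t - b) 0
              else (0 : Int))
            = (fun b => if b ≤ t ∧ t < b + LenB (n / 10) then (cntN (n / 10) (t - b) : Int) else 0) := by
          funext b
          split_ifs with hc
          · rw [PySem.List.getD_map_range _ _ _ _ (by omega)]
          · rfl
        rw [hgetD]
        conv_rhs => rw [hn]
        rw [hb]
        push_cast
        rw [hcast]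
        norm_num

theorem items_update_nodup {ν : Type} (ps : List (Int × ν)) (h : (ps.map Prod.fst).Nodup) :
    (PySem.Dict.ofList ps).items = ps := by
  induction ps using List.reverseRecOn with
  | nil => rfl
  | append_singleton ps p ih =>
    rw [List.map_append] at h
    have h1 : (ps.map Prod.fst).Nodup := (List.nodup_append.1 h).1
    have h2 : p.1 ∉ ps.map Prod.fst := by
      have hd := (List.nodup_append.1 h).2.2
      intro hmem
      exact hd p.1 hmem p.1 (by simp) rfl
    have hofl : PySem.Dict.ofList (ps ++ [p]) = (PySem.Dict.ofList ps).insert p.1 p.2 := by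
      rw [PySem.Dict.ofList, PySem.Dict.update, List.foldl_append]
      rfl
    rw [hofl, PySem.Dict.insert]
    have hitems := ih h1
    have hcon : (PySem.Dict.ofList ps).contains p.1 = false := by
      rw [PySem.Dict.contains, hitems]
      rw [List.any_eq_false]
      intro q hq
      simp only [beq_iff_eq]
      intro he
      exact h2 (he ▸ List.mem_map_of_mem hq)
    rw [hcon]
    simp [hitems]

theorem B_items (n : Int) :
    count_groups_num_alt n
      = (List.range (Mx n.toNat)).map (fun s : Nat => ((s : Int), (cntN n.toNat s : Int))) := by
  unfold count_groups_num_alt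
  have hmax : (max n 0).toNat = n.toNat := by omega
  rw [hmax, cntsB_eq]
  dsimp only []
  rw [ PySem.List.enumerate_eq_zipIdx_map, zipIdx_map_range, List.map_map]
  have hfun : ((fun p : Int × Nat => ((0 : Int) + (p.2 : Int), p.1))
        ∘ (fun t => ((cntN n.toNat t : Int), t)))
      = fun t : Nat => ((t : Int), (cntN n.toNat t : Int)) := by
    funext t
    simp
  rw [hfun, items_update_nodup, LenB_eq_Mx]
  rw [List.map_map]
  apply List.Nodup.map
  · intro a b hab
    simpa using hab
  · exact List.nodup_range

-- ===== VERDICT (by name: the statement is the Claim_ definition above) =====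
theorem count_groups_num_spec : Claim_equal_count_groups_num := by
  intro n _
  unfold Spec_count_groups_num
  rw [A_items, B_items]
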